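-- pv_equiv track=rewrite | github.com/hbazille/adventofcode | 2022/d22p1.py | parsemove
-- ===== SOURCE A (Python) =====
-- def parsemove(l, i):
--     k = 0
--     while i < len(l) and "0" <= l[i] <= "9":
--         k = k*10 + int(l[i])
--         i += 1
--     if i < len(l):
--         return k, l[i], i+1
--     return k, "F", i+1
-- ===== SOURCE B (Python) =====
-- def parsemove(l, i):
--     rest = l[i:]
--     run = ""
--     for c in rest:
--         if "0" <= c <= "9":
--             run += c
--         else:
--             break
--     k = sum((ord(c) - 48) * 10 ** p for p, c in enumerate(reversed(run)))
--     j = i + len(run)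
--     return (k, l[j], j + 1) if j < len(l) else (k, "F", j + 1)
-- ===== Notes on version B (the rewrite author's own statement) =====
-- stated objective: alternative
-- what changed: B slices the tail l[i:], collects the digit run with a for/break loop, and evaluates it as a positional power sum (digit*10**p over the reversed run), instead of A's index-walking while loop with incremental Horner accumulation k=k*10+int(l[i]).
-- outside the precondition, e.g. on parsemove('1x2', -1): A returns (21, 'x', 2), B returns (2, '1', 1); on parsemove('ab', -5): A raises IndexError, B raises IndexError
import Mathlib
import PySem

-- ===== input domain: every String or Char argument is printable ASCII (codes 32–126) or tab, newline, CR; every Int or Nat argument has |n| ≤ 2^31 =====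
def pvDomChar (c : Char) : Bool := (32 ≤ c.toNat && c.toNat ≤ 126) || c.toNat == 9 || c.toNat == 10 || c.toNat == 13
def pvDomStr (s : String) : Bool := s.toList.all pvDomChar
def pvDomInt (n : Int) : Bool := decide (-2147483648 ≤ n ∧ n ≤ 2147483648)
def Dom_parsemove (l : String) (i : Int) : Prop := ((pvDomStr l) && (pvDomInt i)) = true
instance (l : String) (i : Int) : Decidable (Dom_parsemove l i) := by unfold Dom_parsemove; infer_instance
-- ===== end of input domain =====

-- B finds the digit run on a slice and evaluates it as a positional power sum (digit·10^p over the
-- reversed run) instead of A's index-walking Horner accumulation; objective: alternative.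


-- ===== PORT A =====
-- "0" <= c <= "9"
def pvIsDig (c : Char) : Bool := decide ('0' ≤ c) && decide (c ≤ '9')

-- A's while loop: walks index i, Horner-accumulates k; int(l[i]) is exact as toNat-48 since c is '0'..'9';
-- l[i] as pyGetD (exact for -len ≤ i; the guard i < len plus Pre_'s 0 ≤ i puts us there)
def pvALoop (cs : List Char) (k i : Int) : Int × Int :=
  if h : i < PySem.List.len cs then
    let c := PySem.List.pyGetD cs i ' '
    if pvIsDig c then pvALoop cs (k * 10 + ((c.toNat : Int) - 48)) (i + 1) else (k, i)
  else (k, i)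
termination_by (PySem.List.len cs - i).toNat
decreasing_by simp [PySem.List.len] at *; omega

def parsemove (l : String) (i : Int) : Int × String × Int :=
  let cs := l.toList
  let r := pvALoop cs 0 i
  if r.2 < PySem.List.len cs then (r.1, String.ofList [PySem.List.pyGetD cs r.2 ' '], r.2 + 1)
  else (r.1, "F", r.2 + 1)

-- ===== PORT B =====
-- B's for/break loop building run
def pvRun : List Char → List Char
  | [] => []
  | c :: cs => if pvIsDig c then c :: pvRun cs else []

-- sum((ord(c)-48) * 10**p for p, c in enumerate(reversed(run))); the enumerate index p is ≥ 0, so 10**p is 10 ^ p.toNat exactly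
def pvBVal (run : List Char) : Int :=
  (PySem.List.enumerate run.reverse 0).foldl (fun acc pc => acc + ((pc.2.toNat : Int) - 48) * 10 ^ pc.1.toNat) 0

def parsemove_alt (l : String) (i : Int) : Int × String × Int :=
  let cs := l.toList
  let rest := PySem.List.slice cs (some i) none
  let run := pvRun rest
  let k := pvBVal run
  let j := i + PySem.List.len run
  if j < PySem.List.len cs then (k, String.ofList [PySem.List.pyGetD cs j ' '], j + 1)
  else (k, "F", j + 1)

-- ===== PRECONDITION & SPEC =====
-- Pre_ excludes negative start indices: there A raises IndexError when i < -len(l), and for -len(l) ≤ i < 0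
-- A's while loop wraps from the end of the string back to its start mid-number, an accident of negative
-- indexing that no caller relies on (B slices from i instead).
def Pre_parsemove (l : String) (i : Int) : Prop := 0 ≤ i
instance (l : String) (i : Int) : Decidable (Pre_parsemove l i) := by unfold Pre_parsemove; infer_instance
def pvWitness_parsemove : String × Int := ("10R5L2", 0)

def Spec_parsemove (l : String) (i : Int) (out : Int × String × Int) : Prop := out = parsemove_alt l i
instance (l : String) (i : Int) (out : Int × String × Int) : Decidable (Spec_parsemove l i out) := by unfold Spec_parsemove; infer_instance

-- ===== CLAIM (what is proved, stated in full; the proofs are below) =====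
def Claim_equal_parsemove : Prop := ∀ (l : String) (i : Int), Dom_parsemove l i → Pre_parsemove l i → Spec_parsemove l i (parsemove l i)

-- ===== LEMMAS AND PROOFS =====
def pvDval (c : Char) : Int := (c.toNat : Int) - 48

def pvHorner (ds : List Char) (k : Int) : Int := ds.foldl (fun a c => a * 10 + pvDval c) k

theorem pvALoop_eq (cs : List Char) : ∀ (m n : Nat) (k : Int), cs.length - n ≤ m →
    pvALoop cs k (n : Int) = (pvHorner (pvRun (cs.drop n)) k, (n : Int) + ((pvRun (cs.drop n)).length : Int)) := by
  intro m
  induction m with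
  | zero =>
    intro n k hm
    have hn : cs.length ≤ n := by omega
    rw [pvALoop]
    simp [PySem.List.len, List.drop_eq_nil_of_le hn, pvRun, pvHorner]
    omega
  | succ m ih =>
    intro n k hm
    rw [pvALoop]
    by_cases h : n < cs.length
    · have hlt : (n : Int) < PySem.List.len cs := by simp [PySem.List.len]; omega
      rw [dif_pos hlt]
      have hget : PySem.List.pyGetD cs (n : Int) ' ' = cs[n] := by
        rw [PySem.List.pyGetD_natCast]; exact List.getD_eq_getElem cs ' ' h
      have hdrop : cs.drop n = cs[n] :: cs.drop (n + 1) := List.drop_eq_getElem_cons h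
      rw [hget, hdrop]
      by_cases hd : pvIsDig cs[n]
      · rw [if_pos hd]
        have : ((n : Int) + 1) = ((n + 1 : Nat) : Int) := by push_cast; ring
        rw [this, ih (n + 1) _ (by omega)]
        simp [pvRun, hd, pvHorner, pvDval]
        omega
      · rw [if_neg hd]
        simp [pvRun, hd, pvHorner]
    · have hge : ¬ ((n : Int) < PySem.List.len cs) := by simp [PySem.List.len]; omega
      rw [dif_neg hge]
      simp [List.drop_eq_nil_of_le (by omega : cs.length ≤ n), pvRun, pvHorner]

theorem pvHorner_shift (ds : List Char) : ∀ k : Int, pvHorner ds k = k * 10 ^ ds.length + pvHorner ds 0 := by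
  induction ds with
  | nil => intro k; simp [pvHorner]
  | cons c ds ih =>
    intro k
    have h1 : pvHorner (c :: ds) k = pvHorner ds (k * 10 + pvDval c) := rfl
    have h2 : pvHorner (c :: ds) 0 = pvHorner ds (0 * 10 + pvDval c) := rfl
    rw [h1, h2, ih (k * 10 + pvDval c), ih (0 * 10 + pvDval c)]
    simp [List.length_cons]
    ring

theorem pvBVal_eq (run : List Char) : pvBVal run = pvHorner run 0 := by
  induction run with
  | nil => simp [pvBVal, pvHorner]
  | cons c ds ih =>
    have hrev : (c :: ds).reverse = ds.reverse ++ [c] := by simp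
    have henum : PySem.List.enumerate (ds.reverse ++ [c]) 0 =
        PySem.List.enumerate ds.reverse 0 ++ [((ds.reverse.length : Int), c)] := by
      rw [PySem.List.enumerate_append]
      simp [PySem.List.enumerate_cons, PySem.List.enumerate_nil]
    have hfold : pvBVal (c :: ds) = pvBVal ds + pvDval c * 10 ^ ds.length := by
      simp only [pvBVal, hrev, henum, List.foldl_append, List.foldl_cons, List.foldl_nil]
      simp [pvDval, Int.toNat_natCast]
    have hh : pvHorner (c :: ds) 0 = pvDval c * 10 ^ ds.length + pvHorner ds 0 := by
      have : pvHorner (c :: ds) 0 = pvHorner ds (0 * 10 + pvDval c) := rfl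
      rw [this, pvHorner_shift ds (0 * 10 + pvDval c)]
      ring
    rw [hfold, hh, ih]
    ring

-- ===== VERDICT (by name: the statement is the Claim_ definition above) =====
theorem parsemove_spec : Claim_equal_parsemove := by
  intro l i _ hpre
  unfold Spec_parsemove
  lift i to ℕ using hpre with n
  show parsemove l (n : Int) = parsemove_alt l (n : Int)
  have hslice : PySem.List.slice l.toList (some (n : Int)) none = l.toList.drop n :=
    PySem.List.slice_from_natCast l.toList n
  simp only [parsemove, parsemove_alt, hslice, pvBVal_eq,
    pvALoop_eq l.toList (l.toList.length) n 0 (by omega), PySem.List.len_eq]
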